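-- pv_equiv track=rewrite | github.com/weertman/starBoard | src/data/csv_io.py | last_row_per_id
-- ===== SOURCE A (Python) =====
-- from typing import Dict, List, Iterable, Tuple
--
-- def normalize_key(s: str) -> str:
--     """Normalize CSV header keys: strip whitespace and remove BOM."""
--     if s is None:
--         return ""
--     return s.replace("\ufeff", "").strip()
--
-- def normalize_id_value(s: str) -> str:
--     """Normalize ID values for robust matching."""
--     if s is None:
--         return ""
--     return s.replace("\ufeff", "").strip()
--
-- ID_SYNONYMS = {
--     "gallery_id": ["gallery_id"],
--     "query_id": ["query_id", "queries_id", "querries_id"],  # tolerate legacy spellings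
-- }
--
-- def _find_id_key(row: Dict[str, str], id_col: str) -> str | None:
--     """Find the ID column in a row dict, tolerant to BOM/whitespace/casing and legacy names."""
--     id_lower = normalize_key(id_col).lower()
--     candidates = {id_lower}
--     candidates.update(normalize_key(s).lower() for s in ID_SYNONYMS.get(id_lower, []))
--     # Exact/synonym match first
--     for k in row.keys():
--         if normalize_key(k).lower() in candidates:
--             return k
--     # Heuristic fallback: any header ending with "_id"
--     for k in row.keys():
--         if normalize_key(k).lower().endswith("_id"):
--             return k
--     return None
--
-- def _has_any_payload(row: Dict[str, str], id_key_norm: str) -> bool: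
--     """True if any non-ID field is non-empty (after stripping)."""
--     for k, v in row.items():
--         if normalize_key(k).lower() == id_key_norm:
--             continue
--         if (v or "").strip():
--             return True
--     return False
--
-- def last_row_per_id(rows: Iterable[Dict[str, str]], id_col: str) -> Dict[str, Dict[str, str]]:
--     """
--     Reduce to the last row for each ID (append-only semantics).
--     Uses normalized ID values as keys so lookups are robust.
--
--     Safety: ignore trailing "pure-ID" rows (only the ID is filled) so accidental
--     empty saves do not wipe previously saved metadata for that ID.
--     """
--     latest: Dict[str, Dict[str, str]] = {}
--     for row in rows:
--         key = _find_id_key(row, id_col)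
--         if not key:
--             continue
--         _id_raw = row.get(key, "")
--         _id = normalize_id_value(_id_raw)
--         if not _id:
--             continue
--         # If this row has no payload beyond the ID and we already have data for this ID, skip it
--         if _id in latest and not _has_any_payload(row, normalize_key(key).lower()):
--             continue
--         latest[_id] = row
--     return latest
-- ===== SOURCE B (Python) =====
-- from typing import Dict, List, Iterable, Tuple
--
-- def normalize_key(s: str) -> str:
--     """Normalize CSV header keys: strip whitespace and remove BOM."""
--     if s is None:
--         return ""
--     return s.replace("\ufeff", "").strip()
--
-- def normalize_id_value(s: str) -> str:
--     """Normalize ID values for robust matching."""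
--     if s is None:
--         return ""
--     return s.replace("\ufeff", "").strip()
--
-- ID_SYNONYMS = {
--     "gallery_id": ["gallery_id"],
--     "query_id": ["query_id", "queries_id", "querries_id"],
-- }
--
-- def _find_id_key(row, id_col):
--     id_lower = normalize_key(id_col).lower()
--     candidates = {id_lower}
--     candidates.update(normalize_key(s).lower() for s in ID_SYNONYMS.get(id_lower, []))
--     for k in row.keys():
--         if normalize_key(k).lower() in candidates:
--             return k
--     for k in row.keys():
--         if normalize_key(k).lower().endswith("_id"):
--             return k
--     return None
--
-- def _has_any_payload(row, id_key_norm):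
--     for k, v in row.items():
--         if normalize_key(k).lower() == id_key_norm:
--             continue
--         if (v or "").strip():
--             return True
--     return False
--
-- def last_row_per_id(rows, id_col):
--     """Group rows by normalized ID in one pass, then per group select the last
--     payload-bearing row, falling back to the group's first row."""
--     groups = {}
--     for row in rows:
--         key = _find_id_key(row, id_col)
--         if not key:
--             continue
--         _id = normalize_id_value(row.get(key, ""))
--         if not _id:
--             continue
--         has_payload = _has_any_payload(row, normalize_key(key).lower())
--         groups.setdefault(_id, []).append((row, has_payload))
--     result = {}
--     for _id, entries in groups.items():
--         chosen = entries[0][0]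
--         for row, payload in entries:
--             if payload:
--                 chosen = row
--         result[_id] = chosen
--     return result
-- ===== Notes on version B (the rewrite author's own statement) =====
-- stated objective: alternative
-- what changed: A keeps a running 'latest' dict with a skip-if-no-payload overwrite rule inside one loop; B instead groups rows per normalized id in one pass and then, per group, selects the last payload-bearing row (falling back to the group's first row).
import Mathlib
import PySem

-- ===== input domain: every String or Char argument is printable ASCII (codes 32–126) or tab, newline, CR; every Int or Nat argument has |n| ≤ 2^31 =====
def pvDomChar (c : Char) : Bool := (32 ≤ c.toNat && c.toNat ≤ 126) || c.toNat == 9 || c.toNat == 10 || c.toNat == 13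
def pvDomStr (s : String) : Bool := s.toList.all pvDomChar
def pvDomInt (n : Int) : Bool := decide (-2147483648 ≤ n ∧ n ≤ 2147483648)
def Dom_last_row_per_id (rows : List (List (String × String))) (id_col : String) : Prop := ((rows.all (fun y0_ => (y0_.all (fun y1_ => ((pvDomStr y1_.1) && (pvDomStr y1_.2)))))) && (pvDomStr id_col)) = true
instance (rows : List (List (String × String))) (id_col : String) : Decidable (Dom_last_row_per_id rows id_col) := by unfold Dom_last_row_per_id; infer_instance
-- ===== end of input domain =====

-- B keeps A's return value exactly but decomposes differently: one grouping pass per normalized id,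
-- then a per-group selection (last payload-bearing row, else the group's first row). Objective: alternative.

-- ===== PORT A =====
-- shared module helpers (normalize_key / normalize_id_value / ID_SYNONYMS / _find_id_key / _has_any_payload)

def pvNormalizeKey (s : String) : String := PySem.Str.strip (PySem.Str.replace s "\uFEFF" "")

def pvNormalizeId (s : String) : String := PySem.Str.strip (PySem.Str.replace s "\uFEFF" "")

def pvIdSynonyms : PySem.Dict String (List String) :=
  PySem.Dict.ofList [("gallery_id", ["gallery_id"]), ("query_id", ["query_id", "queries_id", "querries_id"])]

-- row.get(key, dflt): a row is a dict (unique keys, insertion order), lookup = first match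
def pvRowGet (row : List (String × String)) (k : String) (dflt : String) : String :=
  ((row.find? (fun kv => kv.1 == k)).map Prod.snd).getD dflt

def pvFindIdKey (row : List (String × String)) (id_col : String) : Option String :=
  let idLower := PySem.Str.lower (pvNormalizeKey id_col)
  let candidates : PySem.Set String :=
    PySem.Set.update (PySem.Set.ofList [idLower])
      ((pvIdSynonyms.getD idLower []).map (fun s => PySem.Str.lower (pvNormalizeKey s)))
  match (row.map Prod.fst).find? (fun k => PySem.Set.contains candidates (PySem.Str.lower (pvNormalizeKey k))) with
  | some k => some k
  | none => (row.map Prod.fst).find? (fun k => PySem.Str.endswith (PySem.Str.lower (pvNormalizeKey k)) "_id")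

def pvHasAnyPayload (row : List (String × String)) (idKeyNorm : String) : Bool :=
  row.any (fun kv => !(PySem.Str.lower (pvNormalizeKey kv.1) == idKeyNorm) && !(PySem.Str.strip kv.2 == ""))

-- the body of A's single loop ('if not key: continue' also skips an empty-string key)
def pvStepA (id_col : String) (latest : PySem.Dict String (List (String × String)))
    (row : List (String × String)) : PySem.Dict String (List (String × String)) :=
  match pvFindIdKey row id_col with
  | none => latest
  | some key =>
    if key == "" then latest
    else
      let idv := pvNormalizeId (pvRowGet row key "")
      if idv == "" then latest
      else if latest.contains idv && !pvHasAnyPayload row (PySem.Str.lower (pvNormalizeKey key)) then latest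
      else latest.insert idv row

def last_row_per_id (rows : List (List (String × String))) (id_col : String) :
    List (String × List (String × String)) :=
  (rows.foldl (pvStepA id_col) PySem.Dict.empty).items

-- ===== PORT B =====
-- grouping pass: groups.setdefault(_id, []).append((row, has_payload))
def pvStepB (id_col : String) (g : PySem.Dict String (List (List (String × String) × Bool)))
    (row : List (String × String)) : PySem.Dict String (List (List (String × String) × Bool)) :=
  match pvFindIdKey row id_col with
  | none => g
  | some key =>
    if key == "" then g
    else
      let idv := pvNormalizeId (pvRowGet row key "")
      if idv == "" then g
      else g.modify idv [] (fun l => l ++ [(row, pvHasAnyPayload row (PySem.Str.lower (pvNormalizeKey key)))])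

-- selection: chosen = entries[0][0]; for row, payload in entries: if payload: chosen = row
-- (groups' lists are never empty, so entries[0] cannot raise; headD supplies the unreachable default)
def pvChoose (entries : List (List (String × String) × Bool)) : List (String × String) :=
  entries.foldl (fun chosen e => if e.2 then e.1 else chosen) (entries.headD ([], false)).1

def last_row_per_id_alt (rows : List (List (String × String))) (id_col : String) :
    List (String × List (String × String)) :=
  let groups := rows.foldl (pvStepB id_col) PySem.Dict.empty
  (groups.items.foldl
    (fun (res : PySem.Dict String (List (String × String))) p => res.insert p.1 (pvChoose p.2))
    PySem.Dict.empty).items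

-- ===== PRECONDITION & SPEC =====
def Spec_last_row_per_id (rows : List (List (String × String))) (id_col : String) (out : List (String × List (String × String))) : Prop := out = last_row_per_id_alt rows id_col
instance (rows : List (List (String × String))) (id_col : String) (out : List (String × List (String × String))) : Decidable (Spec_last_row_per_id rows id_col out) := by unfold Spec_last_row_per_id; infer_instance

-- ===== CLAIM (what is proved, stated in full; the proofs are below) =====
def Claim_equal_last_row_per_id : Prop := ∀ (rows : List (List (String × String))) (id_col : String), Dom_last_row_per_id rows id_col → Spec_last_row_per_id rows id_col (last_row_per_id rows id_col)

-- ===== LEMMAS AND PROOFS =====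

-- proof-side classification of a row: none = the loop skips it, some (id, payload) otherwise
def pvClass (id_col : String) (row : List (String × String)) : Option (String × Bool) :=
  match pvFindIdKey row id_col with
  | none => none
  | some key =>
    if key == "" then none
    else
      let idv := pvNormalizeId (pvRowGet row key "")
      if idv == "" then none
      else some (idv, pvHasAnyPayload row (PySem.Str.lower (pvNormalizeKey key)))

lemma pvStepA_class (id_col : String) (latest : PySem.Dict String (List (String × String)))
    (row : List (String × String)) :
    pvStepA id_col latest row =
      match pvClass id_col row with
      | none => latest
      | some ip => if latest.contains ip.1 && !ip.2 then latest else latest.insert ip.1 row := by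
  unfold pvStepA pvClass
  cases pvFindIdKey row id_col with
  | none => rfl
  | some key =>
    dsimp only
    split_ifs <;> simp [*]

lemma pvStepB_class (id_col : String) (g : PySem.Dict String (List (List (String × String) × Bool)))
    (row : List (String × String)) :
    pvStepB id_col g row =
      match pvClass id_col row with
      | none => g
      | some ip => g.modify ip.1 [] (fun l => l ++ [(row, ip.2)]) := by
  unfold pvStepB pvClass
  cases pvFindIdKey row id_col with
  | none => rfl
  | some key =>
    dsimp only
    split_ifs <;> simp [*]

lemma pvChoose_singleton (r : List (String × String)) (p : Bool) : pvChoose [(r, p)] = r := by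
  cases p <;> rfl

lemma pvChoose_append_true (l : List (List (String × String) × Bool)) (r : List (String × String)) :
    pvChoose (l ++ [(r, true)]) = r := by
  unfold pvChoose; rw [List.foldl_append]; simp

lemma pvChoose_append_false (l : List (List (String × String) × Bool)) (r : List (String × String))
    (h : l ≠ []) : pvChoose (l ++ [(r, false)]) = pvChoose l := by
  cases l with
  | nil => exact absurd rfl h
  | cons a t => unfold pvChoose; rw [List.foldl_append]; simp

def pvInv (g : PySem.Dict String (List (List (String × String) × Bool)))
    (latest : PySem.Dict String (List (String × String))) : Prop :=
  latest.items = g.items.map (fun q => (q.1, pvChoose q.2)) ∧ g.keys.Nodup ∧ ∀ q ∈ g.items, q.2 ≠ []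

lemma pvInv_keys {g : PySem.Dict String (List (List (String × String) × Bool))}
    {latest : PySem.Dict String (List (String × String))} (h : pvInv g latest) :
    latest.keys = g.keys := by
  show latest.items.map Prod.fst = g.items.map Prod.fst
  rw [h.1, List.map_map]; rfl

lemma pvInv_step (id_col : String) (row : List (String × String))
    (g : PySem.Dict String (List (List (String × String) × Bool)))
    (latest : PySem.Dict String (List (String × String))) (h : pvInv g latest) :
    pvInv (pvStepB id_col g row) (pvStepA id_col latest row) := by
  rw [pvStepA_class, pvStepB_class]
  cases hc : pvClass id_col row with
  | none => exact h
  | some ip =>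
    obtain ⟨i, p⟩ := ip
    obtain ⟨hitems, hnd, hne⟩ := h
    dsimp only
    have hcont : latest.contains i = g.contains i := by
      rw [PySem.Dict.contains_eq_decide_mem_keys, PySem.Dict.contains_eq_decide_mem_keys,
        pvInv_keys ⟨hitems, hnd, hne⟩]
    have hmod : g.modify i [] (fun l => l ++ [(row, p)]) = g.insert i (g.getD i [] ++ [(row, p)]) := rfl
    by_cases hg : g.contains i = true
    · -- the id already has a group: modify appends to it in place
      have hBitems : (g.modify i [] (fun l => l ++ [(row, p)])).items =
          g.items.map (fun q => if (q.1 == i) = true then (i, g.getD i [] ++ [(row, p)]) else q) := by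
        rw [hmod]; exact PySem.Dict.items_insert_of_contains g _ hg
      have hval : ∀ q ∈ g.items, (q.1 == i) = true → q.2 = g.getD i [] := by
        intro q hq hqi
        have hm : (q.1, q.2) ∈ g.items := hq
        have := PySem.Dict.getD_of_mem_items g hm hnd []
        rw [eq_of_beq hqi] at this
        exact this.symm
      have hkeysB : (g.modify i [] (fun l => l ++ [(row, p)])).keys = g.keys := by
        show (g.modify i [] (fun l => l ++ [(row, p)])).items.map Prod.fst = g.items.map Prod.fst
        rw [hBitems, List.map_map]
        refine List.map_congr_left (fun q hq => ?_)
        by_cases hqi : (q.1 == i) = true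
        · simp [Function.comp, (eq_of_beq hqi).symm]
        · have hqe : q.1 ≠ i := by simpa using hqi
          simp [Function.comp, hqe]
      refine ⟨?_, by rw [hkeysB]; exact hnd, ?_⟩
      · -- items relation
        cases p with
        | false =>
          -- A skips the row (id present, no payload); the selected row of the group is unchanged
          have hcnd : (latest.contains i && !false) = true := by rw [hcont, hg]; rfl
          rw [if_pos hcnd, hBitems, List.map_map, hitems]
          refine List.map_congr_left (fun q hq => ?_)
          by_cases hqi : (q.1 == i) = true
          · have hq2 := hval q hq hqi
            have hqe : q.1 = i := eq_of_beq hqi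
            simp [Function.comp, ← hq2, hqe, pvChoose_append_false _ _ (hne q hq)]
          · have hqe : q.1 ≠ i := by simpa using hqi
            simp [Function.comp, hqe]
        | true =>
          -- A overwrites in place; the group's selected row becomes this row
          have hcnd : ¬((latest.contains i && !true) = true) := by simp
          rw [if_neg hcnd]
          have hlc : latest.contains i = true := by rw [hcont]; exact hg
          rw [PySem.Dict.items_insert_of_contains latest row hlc, hBitems, List.map_map, hitems,
            List.map_map]
          refine List.map_congr_left (fun q hq => ?_)
          by_cases hqi : (q.1 == i) = true
          · have hq2 := hval q hq hqi
            have hqe : q.1 = i := eq_of_beq hqi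
            simp [Function.comp, ← hq2, hqe, pvChoose_append_true]
          · have hqe : q.1 ≠ i := by simpa using hqi
            simp [Function.comp, hqe]
      · -- all groups stay nonempty
        intro q hq
        rw [hBitems] at hq
        obtain ⟨q', hq', rfl⟩ := List.mem_map.mp hq
        by_cases hqi : (q'.1 == i) = true
        · simp [hqi]
        · have hqe : q'.1 ≠ i := by simpa using hqi
          simpa [hqe] using hne q' hq'
    · -- fresh id: both dicts append a new entry
      have hg' : g.contains i = false := by revert hg; cases g.contains i <;> simp
      have hlc : latest.contains i = false := by rw [hcont]; exact hg'
      have hBitems : (g.modify i [] (fun l => l ++ [(row, p)])).items = g.items ++ [(i, [(row, p)])] := by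
        rw [hmod, PySem.Dict.getD_of_not_contains g [] hg']
        exact PySem.Dict.items_insert_of_not_contains g _ hg'
      have hcnd : ¬((latest.contains i && !p) = true) := by simp [hlc]
      refine ⟨?_, ?_, ?_⟩
      · rw [if_neg hcnd, PySem.Dict.items_insert_of_not_contains latest row hlc, hBitems,
          List.map_append, hitems]
        simp [pvChoose_singleton]
      · have hk : (g.modify i [] (fun l => l ++ [(row, p)])).keys = g.keys ++ [i] := by
          rw [hmod, PySem.Dict.getD_of_not_contains g [] hg']
          exact PySem.Dict.keys_insert_of_not_contains g _ hg'
        rw [hk]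
        have hni : i ∉ g.keys := fun hmem =>
          absurd ((PySem.Dict.contains_iff_mem_keys g i).mpr hmem) (by rw [hg']; exact Bool.false_ne_true)
        simp [List.nodup_append, hnd]
        exact fun a ha e => hni (e ▸ ha)
      · intro q hq
        rw [hBitems] at hq
        rcases List.mem_append.mp hq with h1 | h1
        · exact hne q h1
        · simp only [List.mem_singleton] at h1; subst h1; simp

lemma pvInv_fold (id_col : String) (rows : List (List (String × String)))
    (g : PySem.Dict String (List (List (String × String) × Bool)))
    (latest : PySem.Dict String (List (String × String))) (h : pvInv g latest) :
    pvInv (rows.foldl (pvStepB id_col) g) (rows.foldl (pvStepA id_col) latest) := by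
  induction rows generalizing g latest with
  | nil => exact h
  | cons r t ih => exact ih _ _ (pvInv_step id_col r g latest h)

-- ===== VERDICT (by name: the statement is the Claim_ definition above) =====
theorem last_row_per_id_spec : Claim_equal_last_row_per_id := by
  intro rows id_col _
  unfold Spec_last_row_per_id last_row_per_id last_row_per_id_alt
  have hinv := pvInv_fold id_col rows PySem.Dict.empty PySem.Dict.empty
    ⟨rfl, PySem.Dict.nodup_keys_empty, by intro q hq; cases hq⟩
  set groups := rows.foldl (pvStepB id_col) PySem.Dict.empty with hgdef
  have hfresh : ∀ a ∈ groups.items, (PySem.Dict.empty (κ := String) (ν := List (String × String))).contains a.1 = false := by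
    intro a _; rfl
  have hndk : (groups.items.map Prod.fst).Nodup := hinv.2.1
  have := PySem.Dict.items_foldl_insert_fresh groups.items Prod.fst (fun p => pvChoose p.2)
    PySem.Dict.empty hfresh hndk
  simp only [] at this ⊢
  rw [hinv.1, this]
  rfl
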